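-- pv_equiv track=rewrite | github.com/bprah/2802ICT-Rush-Hour | rush_hour.py | blocking_cars_empty_spaces
-- ===== SOURCE A (Python) =====
-- def blocking_cars_empty_spaces(game_state: list):
--     temp = game_state[2]
--     empty_spaces = 0
--     no_cars_blocking = 0
--     car_index = len(temp) - temp[::-1].index('x') - 1
--     distance = 5 - car_index
--     for i in range(car_index + 1, len(temp)):
--         if str(temp[i]) == '.':
--             empty_spaces += 1
--         if str(temp[i]).isalpha():
--             no_cars_blocking += 1
--     return empty_spaces + no_cars_blocking + distance
-- ===== SOURCE B (Python) =====
-- def blocking_cars_empty_spaces(game_state: list):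
--     temp = game_state[2]
--     empty_spaces = 0
--     no_cars_blocking = 0
--     last_x = -1
--     for i, cell in enumerate(temp):
--         if cell == 'x':
--             empty_spaces = 0
--             no_cars_blocking = 0
--             last_x = i
--         else:
--             s = str(cell)
--             if s == '.':
--                 empty_spaces += 1
--             if s.isalpha():
--                 no_cars_blocking += 1
--     if last_x == -1:
--         raise ValueError("'x' is not in list")
--     return empty_spaces + no_cars_blocking + (5 - last_x)
-- ===== Notes on version B (the rewrite author's own statement) =====
-- stated objective: simpler
-- what changed: One forward pass over the row that resets the counters at each 'x' and remembers its index, instead of reversing the row to locate the last 'x' and then a second indexed loop over the suffix.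
import Mathlib
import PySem

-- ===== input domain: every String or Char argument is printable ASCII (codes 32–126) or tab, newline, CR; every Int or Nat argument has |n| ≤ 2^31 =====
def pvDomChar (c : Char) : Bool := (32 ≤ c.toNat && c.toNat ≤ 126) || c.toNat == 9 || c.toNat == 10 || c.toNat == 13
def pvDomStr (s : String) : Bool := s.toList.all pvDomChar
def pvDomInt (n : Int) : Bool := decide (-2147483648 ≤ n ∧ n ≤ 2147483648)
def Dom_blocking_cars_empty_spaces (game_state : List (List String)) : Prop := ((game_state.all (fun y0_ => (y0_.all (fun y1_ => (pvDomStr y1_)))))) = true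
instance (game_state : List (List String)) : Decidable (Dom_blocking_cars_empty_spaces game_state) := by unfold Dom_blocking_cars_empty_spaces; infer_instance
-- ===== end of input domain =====

-- B replaces A's reverse-index search for the last 'x' plus a second indexed loop over the
-- suffix by one forward pass that resets its counters at each 'x' (objective: simpler).

-- ===== PORT A =====
-- loop body of A's suffix loop (the two ifs, in A's order)
def pvStepA (acc : Int × Int) (c : String) : Int × Int :=
  let acc1 := if c == "." then (acc.1 + 1, acc.2) else acc
  if PySem.Str.strIsalpha c then (acc1.1, acc1.2 + 1) else acc1

def blocking_cars_empty_spaces (game_state : List (List String)) : Int :=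
  match PySem.List.pyGet? game_state 2 with
  | none => 0            -- IndexError (outside Pre_)
  | some temp =>
    match PySem.List.slice? temp none none (-1) with
    | none => 0          -- unreachable: step = -1
    | some rev =>
      match PySem.List.index? rev "x" with
      | none => 0        -- ValueError (outside Pre_)
      | some ridx =>
        let car_index : Int := (temp.length : Int) - (ridx : Int) - 1
        let distance : Int := 5 - car_index
        let st :=
          (PySem.List.pyRange (car_index + 1) (temp.length : Int) 1).foldl
            (fun (acc : Int × Int) i => pvStepA acc (PySem.List.pyGetD temp i ""))
            (0, 0)
        st.1 + st.2 + distance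

-- ===== PORT B =====
-- loop body of B's single pass: reset at 'x', otherwise count
def pvStepB (s : Int × Int × Int) (p : Int × String) : Int × Int × Int :=
  if p.2 == "x" then (0, 0, p.1)
  else
    let e := if p.2 == "." then s.1 + 1 else s.1
    let c := if PySem.Str.strIsalpha p.2 then s.2.1 + 1 else s.2.1
    (e, c, s.2.2)

def blocking_cars_empty_spaces_alt (game_state : List (List String)) : Int :=
  match PySem.List.pyGet? game_state 2 with
  | none => 0            -- IndexError (outside Pre_)
  | some temp =>
    let st :=
      (PySem.List.enumerate temp).foldl pvStepB (0, 0, -1)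
    if st.2.2 == -1 then 0   -- ValueError (outside Pre_)
    else st.1 + st.2.1 + (5 - st.2.2)

-- ===== PRECONDITION & SPEC =====
-- Pre_ excludes exactly the inputs on which A raises: fewer than 3 rows (IndexError on
-- game_state[2]) or no 'x' in row 2 (ValueError from .index('x')).
def Pre_blocking_cars_empty_spaces (game_state : List (List String)) : Prop :=
  3 ≤ game_state.length ∧ "x" ∈ game_state.getD 2 []
instance (game_state : List (List String)) : Decidable (Pre_blocking_cars_empty_spaces game_state) := by unfold Pre_blocking_cars_empty_spaces; infer_instance
def pvWitness_blocking_cars_empty_spaces : List (List String) := [[], [], ["x", ".", "A"]]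
def Spec_blocking_cars_empty_spaces (game_state : List (List String)) (out : Int) : Prop := out = blocking_cars_empty_spaces_alt game_state
instance (game_state : List (List String)) (out : Int) : Decidable (Spec_blocking_cars_empty_spaces game_state out) := by unfold Spec_blocking_cars_empty_spaces; infer_instance

-- ===== CLAIM (what is proved, stated in full; the proofs are below) =====
def Claim_equal_blocking_cars_empty_spaces : Prop := ∀ (game_state : List (List String)), Dom_blocking_cars_empty_spaces game_state → Pre_blocking_cars_empty_spaces game_state → Spec_blocking_cars_empty_spaces game_state (blocking_cars_empty_spaces game_state)

-- ===== LEMMAS AND PROOFS =====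

theorem pvStepA_eq (acc : Int × Int) (c : String) :
    pvStepA acc c = (acc.1 + (if c == "." then 1 else 0),
                     acc.2 + (if PySem.Str.strIsalpha c then 1 else 0)) := by
  unfold pvStepA
  by_cases h1 : (c == ".") = true <;> by_cases h2 : PySem.Str.strIsalpha c = true <;>
    simp only [h1, h2, if_true, if_false, Bool.false_eq_true] <;> simp

theorem pvStepB_no_x (st : Int × Int × Int) (p : Int × String) (h : (p.2 == "x") = false) :
    pvStepB st p = (st.1 + (if p.2 == "." then 1 else 0),
                    st.2.1 + (if PySem.Str.strIsalpha p.2 then 1 else 0), st.2.2) := by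
  unfold pvStepB
  rw [h]
  by_cases h1 : (p.2 == ".") = true <;> by_cases h2 : PySem.Str.strIsalpha p.2 = true <;>
    simp only [h1, h2, if_true, if_false, Bool.false_eq_true] <;> simp

-- A's suffix loop counts '.' cells and alphabetic cells of the traversed list.
theorem pvA_fold (t : List String) (e c : Int) :
    t.foldl pvStepA (e, c)
    = (e + (t.countP (fun x => x == ".") : Int),
       c + (t.countP (fun x => PySem.Str.strIsalpha x) : Int)) := by
  induction t generalizing e c with
  | nil => simp
  | cons a t ih =>
    rw [List.foldl_cons, pvStepA_eq, ih]
    simp only [List.countP_cons, Prod.mk.injEq]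
    constructor <;> split_ifs <;> push_cast <;> ring

-- B's pass over an 'x'-free stretch only increments the two counters.
theorem pvB_fold_no_x (t : List String) (hx : "x" ∉ t) (s e c j : Int) :
    (PySem.List.enumerate t s).foldl pvStepB (e, c, j)
    = (e + (t.countP (fun x => x == ".") : Int),
       c + (t.countP (fun x => PySem.Str.strIsalpha x) : Int), j) := by
  induction t generalizing s e c with
  | nil => simp [PySem.List.enumerate_nil]
  | cons a t ih =>
    have hax : (a == "x") = false := by
      simp only [List.mem_cons, not_or] at hx
      simpa [beq_eq_false_iff_ne] using fun h => hx.1 h.symm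
    rw [PySem.List.enumerate_cons, List.foldl_cons,
        pvStepB_no_x _ _ (by simpa using hax),
        ih (by simp_all) (s+1)]
    simp only [List.countP_cons, Prod.mk.injEq]
    refine ⟨?_, ?_, ?_⟩ <;> first | trivial | (split_ifs <;> push_cast <;> ring)

theorem pv_enumerate_append (l r : List String) (s : Int) :
    PySem.List.enumerate (l ++ r) s
      = PySem.List.enumerate l s ++ PySem.List.enumerate r (s + l.length) := by
  induction l generalizing s with
  | nil => simp [PySem.List.enumerate_nil]
  | cons a l ih =>
    simp [PySem.List.enumerate_cons, ih (s+1)]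
    ring_nf

-- ===== VERDICT (by name: the statement is the Claim_ definition above) =====
theorem blocking_cars_empty_spaces_spec : Claim_equal_blocking_cars_empty_spaces := by
  intro gs _ hpre
  obtain ⟨hlen, hmem⟩ := hpre
  rcases gs with _ | ⟨r0, gs⟩
  · simp at hlen
  rcases gs with _ | ⟨r1, gs⟩
  · simp at hlen
  rcases gs with _ | ⟨r2, gs⟩
  · simp at hlen
  have hmem' : "x" ∈ r2 := by simpa using hmem
  have hget : PySem.List.pyGet? (r0 :: r1 :: r2 :: gs) 2 = some r2 := by
    have hc : (2:Int) ≤ (gs.length:Int) + 1 + 1 := by omega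
    simp [PySem.List.pyGet?, PySem.List.pyIdx?, hc]
  -- split r2 at its LAST 'x'
  obtain ⟨r, hr⟩ : ∃ r, PySem.List.index? r2.reverse "x" = some r := by
    have := (PySem.List.index?_isSome_iff (xs := r2.reverse) (v := "x")).mpr
      (by simpa using hmem')
    exact Option.isSome_iff_exists.mp this
  obtain ⟨pre, suf, hrev, hprelen, hxpre⟩ := (PySem.List.index?_eq_some_iff _ _ _).mp hr
  have hr2 : r2 = suf.reverse ++ "x" :: pre.reverse := by
    have := congrArg List.reverse hrev
    simpa using this
  set l := suf.reverse with hl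
  set t := pre.reverse with ht
  have hxt : "x" ∉ t := by simpa [ht] using hxpre
  have hlenr2 : r2.length = l.length + 1 + t.length := by
    rw [hr2]; simp; omega
  have hprelen' : (pre.length : Int) = (t.length : Int) := by simp [ht]
  unfold Spec_blocking_cars_empty_spaces blocking_cars_empty_spaces blocking_cars_empty_spaces_alt
  rw [hget]
  dsimp only
  rw [PySem.List.slice?_none_none_neg_one]
  dsimp only
  rw [hr]
  dsimp only
  -- A side
  have hci : (r2.length : Int) - (r : Int) - 1 = (l.length : Int) := by
    subst hprelen; rw [hprelen']; push_cast [hlenr2]; ring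
  rw [hci]
  have hfoldA :
      (PySem.List.pyRange ((l.length : Int) + 1) ((r2.length : Nat) : Int) 1).foldl
        (fun (acc : Int × Int) i => pvStepA acc (PySem.List.pyGetD r2 i ""))
        (0, 0)
      = (r2.drop ((l.length : Int) + 1).toNat).foldl pvStepA (0, 0) := by
    exact PySem.List.foldl_pyRange_pyGetD r2 "" pvStepA (0, 0) (by omega)
  rw [hfoldA]
  have hdrop : r2.drop ((l.length : Int) + 1).toNat = t := by
    have h1 : ((l.length : Int) + 1).toNat = l.length + 1 := by omega
    rw [h1, hr2]
    simp [List.drop_append]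
  rw [hdrop, pvA_fold]
  -- B side
  rw [hr2, pv_enumerate_append, List.foldl_append, PySem.List.enumerate_cons,
      List.foldl_cons]
  have hstepx (st : Int × Int × Int) :
      pvStepB st ((0 : Int) + l.length, "x") = (0, 0, (0 : Int) + l.length) := by
    simp [pvStepB]
  rw [hstepx, pvB_fold_no_x t hxt]
  have hb : ((0 : Int) + (l.length : Int) == -1) = false := by
    simp only [beq_eq_false_iff_ne]
    omega
  rw [hb]
  dsimp only
  push_cast
  ring
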